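-- pv_equiv track=rewrite | github.com/yu-jiyu-jiyu-jiyu-ji/nittei_chosei_system | services/candidate_search_service.py | _n_choose_k_exceeds
-- ===== SOURCE A (Python) =====
-- def _n_choose_k_exceeds(n: int, k: int, threshold: int) -> bool:
--     """nCk が threshold を超えるかを途中打ち切りで判定する。"""
--     if threshold <= 0:
--         return True
--     if k < 0 or n < 0 or k > n:
--         return False
--     k = min(k, n - k)
--     if k == 0:
--         return 1 > threshold
--     result = 1
--     for i in range(1, k + 1):
--         result = (result * (n - k + i)) // i
--         if result > threshold:
--             return True
--     return False
-- ===== SOURCE B (Python) =====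
-- import math
--
-- def _n_choose_k_exceeds(n: int, k: int, threshold: int) -> bool:
--     """nCk が threshold を超えるかを閉形式で判定する。"""
--     if threshold <= 0:
--         return True
--     if k < 0 or n < 0 or k > n:
--         return False
--     kk = min(k, n - k)
--     if kk >= threshold.bit_length():
--         # C(n, kk) >= 2**kk > threshold, since every factor (n-kk+i)/i >= 2
--         return True
--     return math.comb(n, kk) > threshold
-- ===== Notes on version B (the rewrite author's own statement) =====
-- stated objective: alternative
-- what changed: Replaced the incremental multiply/divide loop with early exit by a bit-length shortcut (kk >= threshold.bit_length() implies C(n,kk) >= 2**kk > threshold) plus a single closed-form math.comb call for the remaining small-kk cases.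
import Mathlib
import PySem

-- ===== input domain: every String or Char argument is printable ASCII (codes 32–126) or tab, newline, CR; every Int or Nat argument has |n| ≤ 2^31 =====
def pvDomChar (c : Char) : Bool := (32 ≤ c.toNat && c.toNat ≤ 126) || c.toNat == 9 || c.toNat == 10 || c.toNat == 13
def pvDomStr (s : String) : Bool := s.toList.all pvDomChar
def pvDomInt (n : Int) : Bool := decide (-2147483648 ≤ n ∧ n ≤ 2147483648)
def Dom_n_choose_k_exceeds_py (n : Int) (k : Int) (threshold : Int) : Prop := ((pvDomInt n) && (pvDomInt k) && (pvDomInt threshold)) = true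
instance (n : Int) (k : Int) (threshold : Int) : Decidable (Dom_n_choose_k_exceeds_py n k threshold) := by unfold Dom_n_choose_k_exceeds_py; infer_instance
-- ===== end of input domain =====

-- B replaces A's early-exit incremental loop by a bit-length shortcut plus one closed-form binomial comparison (alternative).

-- ===== PORT A =====
-- the 'for i in range(1, k+1)' loop with early return True
def nckLoopA (n kk threshold : Int) : List Int → Int → Bool
  | [], _ => false
  | i :: rest, result =>
    let r := PySem.Int.floordiv (result * (n - kk + i)) i
    if r > threshold then true else nckLoopA n kk threshold rest r

def n_choose_k_exceeds_py (n : Int) (k : Int) (threshold : Int) : Bool :=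
  if threshold ≤ 0 then true
  else if k < 0 ∨ n < 0 ∨ k > n then false
  else
    let kk := min k (n - k)
    if kk = 0 then decide (1 > threshold)
    else nckLoopA n kk threshold (PySem.List.pyRange 1 (kk + 1) 1) 1

-- ===== PORT B =====
-- math.comb(n, k) ported as Nat.choose (guards ensure 0 ≤ k ≤ n)
def n_choose_k_exceeds_py_alt (n : Int) (k : Int) (threshold : Int) : Bool :=
  if threshold ≤ 0 then true
  else if k < 0 ∨ n < 0 ∨ k > n then false
  else
    let kk := min k (n - k)
    if kk ≥ (PySem.Int.bitLength threshold : Int) then true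
    else decide ((Nat.choose n.toNat kk.toNat : Int) > threshold)

-- ===== PRECONDITION & SPEC =====
def Spec_n_choose_k_exceeds_py (n : Int) (k : Int) (threshold : Int) (out : Bool) : Prop := out = n_choose_k_exceeds_py_alt n k threshold
instance (n : Int) (k : Int) (threshold : Int) (out : Bool) : Decidable (Spec_n_choose_k_exceeds_py n k threshold out) := by unfold Spec_n_choose_k_exceeds_py; infer_instance

-- ===== CLAIM (what is proved, stated in full; the proofs are below) =====
def Claim_equal_n_choose_k_exceeds_py : Prop := ∀ (n : Int) (k : Int) (threshold : Int), Dom_n_choose_k_exceeds_py n k threshold → Spec_n_choose_k_exceeds_py n k threshold (n_choose_k_exceeds_py n k threshold)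

-- ===== LEMMAS AND PROOFS =====

-- C(m+j, j) is nondecreasing in j
lemma choose_diag_mono (m : Nat) : ∀ c j : Nat, j ≤ c → Nat.choose (m + j) j ≤ Nat.choose (m + c) c := by
  intro c
  induction c with
  | zero =>
    intro j hj
    have hj0 : j = 0 := Nat.le_zero.mp hj
    subst hj0
    exact le_refl _
  | succ c ih =>
    intro j hj
    rcases Nat.lt_or_ge j (c + 1) with h | h
    · have h1 := ih j (by omega)
      have h2 := Nat.choose_succ_succ' (m + c) c
      have hg : m + (c + 1) = m + c + 1 := by omega
      rw [hg]
      omega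
    · have : j = c + 1 := by omega
      subst this; exact le_refl _

-- one loop step: the accumulator C(m+j,j) becomes C(m+j+1,j+1) exactly
lemma step_exact (m j : Nat) :
    PySem.Int.floordiv ((Nat.choose (m + j) j : Int) * ((j : Int) + 1 + (m : Int))) ((j : Int) + 1)
      = (Nat.choose (m + j + 1) (j + 1) : Int) := by
  have hpos : (0 : Int) < (j : Int) + 1 := by positivity
  rw [PySem.Int.floordiv_eq_ediv_of_pos hpos]
  have hmul : (Nat.choose (m + j) j : Int) * ((j : Int) + 1 + (m : Int))
      = (Nat.choose (m + j + 1) (j + 1) : Int) * ((j : Int) + 1) := by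
    have h := Nat.add_one_mul_choose_eq (m + j) j
    -- (m+j+1) * choose (m+j) j = choose (m+j+1) (j+1) * (j+1)
    push_cast [Nat.succ_eq_add_one] at h ⊢
    nlinarith [h]
  rw [hmul, Int.mul_ediv_cancel _ (by omega)]

-- loop invariant: with accumulator C(m+j,j) ≤ threshold, the rest of the loop
-- decides whether C(m+c,c) exceeds threshold
lemma loop_eq (threshold : Int) (m c : Nat) :
    ∀ d j : Nat, j + d = c → ((Nat.choose (m + j) j : Int) ≤ threshold) →
      nckLoopA ((m : Int) + (c : Int)) (c : Int) threshold
        (PySem.List.pyRange ((j : Int) + 1) ((c : Int) + 1) 1) ((Nat.choose (m + j) j : Int))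
      = decide (threshold < (Nat.choose (m + c) c : Int)) := by
  intro d
  induction d with
  | zero =>
    intro j hj hle
    have hjc : j = c := by omega
    subst hjc
    rw [PySem.List.pyRange_one_eq_nil (by omega)]
    simp [nckLoopA]
    omega
  | succ d ih =>
    intro j hj hle
    have hjc : j < c := by omega
    rw [PySem.List.pyRange_one_cons (by exact_mod_cast (by omega : (j : Int) + 1 < (c : Int) + 1))]
    simp only [nckLoopA]
    have harg : (m : Int) + (c : Int) - (c : Int) + ((j : Int) + 1) = (j : Int) + 1 + (m : Int) := by ring
    rw [harg, step_exact]
    by_cases hgt : (Nat.choose (m + j + 1) (j + 1) : Int) > threshold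
    · rw [if_pos hgt]
      have hmono : Nat.choose (m + (j + 1)) (j + 1) ≤ Nat.choose (m + c) c :=
        choose_diag_mono m c (j + 1) (by omega)
      have : threshold < (Nat.choose (m + c) c : Int) := by
        have : ((Nat.choose (m + (j + 1)) (j + 1) : Nat) : Int) ≤ (Nat.choose (m + c) c : Int) := by
          exact_mod_cast hmono
        have h' : (Nat.choose (m + (j + 1)) (j + 1) : Int) = (Nat.choose (m + j + 1) (j + 1) : Int) := by
          norm_num [Nat.add_assoc]
        omega
      simp [this]
    · rw [if_neg hgt]
      have h' : (m + j + 1) = (m + (j + 1)) := by omega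
      rw [h']
      have := ih (j + 1) (by omega) (by rw [← h']; omega)
      push_cast at this ⊢
      convert this using 3
-- C(n, k) is nondecreasing in n (via Pascal)  — used through Nat.choose_le_choose

-- for c ≤ m: C(m+c, c) ≤ C(m+c, c+1) (ratio identity choose_succ_right_eq)
lemma choose_le_choose_succ_col (m c : Nat) (h : c + 1 ≤ m) :
    Nat.choose (m + c) c ≤ Nat.choose (m + c) (c + 1) := by
  have hid := Nat.choose_succ_right_eq (m + c) c
  -- choose (m+c) (c+1) * (c+1) = choose (m+c) c * (m + c - c)
  have hmc : m + c - c = m := by omega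
  rw [hmc] at hid
  have h1 : Nat.choose (m + c) c * (c + 1) ≤ Nat.choose (m + c) c * m :=
    Nat.mul_le_mul_left _ h
  have h2 : Nat.choose (m + c) c * (c + 1) ≤ Nat.choose (m + c) (c + 1) * (c + 1) := by omega
  exact Nat.le_of_mul_le_mul_right h2 (by omega)

-- for c ≤ m: 2^c ≤ C(m+c, c)
lemma two_pow_le_choose (c : Nat) : ∀ m : Nat, c ≤ m → 2 ^ c ≤ Nat.choose (m + c) c := by
  induction c with
  | zero => intro m _; simp
  | succ c ih =>
    intro m hm
    have h1 : 2 ^ c ≤ Nat.choose (m + c) c := ih m (by omega)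
    have h2 : Nat.choose (m + c) c ≤ Nat.choose (m + c) (c + 1) :=
      choose_le_choose_succ_col m c hm
    have h3 := Nat.choose_succ_succ' (m + c) c
    -- choose (m+c+1) (c+1) = choose (m+c) c + choose (m+c) (c+1)
    have hg : m + (c + 1) = m + c + 1 := by omega
    rw [hg]
    calc 2 ^ (c + 1) = 2 ^ c + 2 ^ c := by ring
    _ ≤ Nat.choose (m + c) c + Nat.choose (m + c) (c + 1) := by omega
    _ = Nat.choose (m + c + 1) (c + 1) := h3.symm

-- ===== VERDICT (by name: the statement is the Claim_ definition above) =====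
theorem n_choose_k_exceeds_py_spec : Claim_equal_n_choose_k_exceeds_py := by
  intro n k threshold _
  unfold Spec_n_choose_k_exceeds_py n_choose_k_exceeds_py n_choose_k_exceeds_py_alt
  by_cases ht : threshold ≤ 0
  · simp [ht]
  · rw [if_neg ht, if_neg ht]
    by_cases hg : k < 0 ∨ n < 0 ∨ k > n
    · simp [hg]
    · rw [if_neg hg, if_neg hg]
      push Not at hg ht
      obtain ⟨hk0, hn0, hkn⟩ := hg
      set c : Nat := (min k (n - k)).toNat with hc
      set m : Nat := (n - min k (n - k)).toNat with hm
      have hcm : c ≤ m := by omega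
      have hnm : n = (m : Int) + (c : Int) := by omega
      have hkkc : min k (n - k) = (c : Int) := by omega
      -- A's side computes decide (threshold < C(n, k))
      have hA : (if min k (n - k) = 0 then decide (1 > threshold)
            else nckLoopA n (min k (n - k)) threshold
              (PySem.List.pyRange 1 (min k (n - k) + 1) 1) 1)
          = decide (threshold < (Nat.choose (m + c) c : Int)) := by
        by_cases hmin : min k (n - k) = 0
        · rw [if_pos hmin]
          have hc0 : c = 0 := by omega
          rw [hc0]
          simp only [Nat.add_zero, Nat.choose_zero_right, Nat.cast_one]
        · rw [if_neg hmin]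
          have key := loop_eq threshold m c c 0 (by omega) (by simp; omega)
          simp only [Nat.cast_zero, zero_add, Nat.add_zero, Nat.choose_zero_right,
            Nat.cast_one] at key
          rw [← hnm] at key
          rw [hkkc, key]
      rw [hA, hkkc]
      -- B's side: shortcut or small comb
      by_cases hbl : (c : Int) ≥ (PySem.Int.bitLength threshold : Int)
      · rw [if_pos hbl]
        have hlt : threshold < (Nat.choose (m + c) c : Int) := by
          have h1 : threshold.natAbs < 2 ^ PySem.Int.bitLength threshold :=
            PySem.Int.lt_two_pow_bitLength threshold
          have h2 : 2 ^ PySem.Int.bitLength threshold ≤ 2 ^ c :=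
            Nat.pow_le_pow_right (by omega) (by omega)
          have h3 : 2 ^ c ≤ Nat.choose (m + c) c := two_pow_le_choose c m hcm
          have h4 : threshold.natAbs < Nat.choose (m + c) c := by omega
          omega
        simp [hlt]
      · rw [if_neg hbl]
        have h5 : ((c : Int)).toNat = c := by omega
        have h6 : n.toNat = m + c := by omega
        rw [h5, h6]
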